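-- pv_equiv track=rewrite | github.com/taiduydinh/pypm | codes/ghui_miner.py | sameAs
-- ===== SOURCE A (Python) =====
-- def sameAs(itemset1, itemset2, pos_removed):
--     j = 0
--     for i in range(len(itemset1)):
--         if j == pos_removed:
--             j += 1
--         if itemset1[i] == itemset2[j]:
--             j += 1
--         elif itemset1[i] > itemset2[j]:
--             return 1
--         else:
--             return -1
--     return 0
-- ===== SOURCE B (Python) =====
-- def sameAs(itemset1, itemset2, pos_removed):
--     filtered = [x for idx, x in enumerate(itemset2) if idx != pos_removed]
--     for i in range(len(itemset1)):
--         if itemset1[i] > filtered[i]: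
--             return 1
--         if itemset1[i] < filtered[i]:
--             return -1
--     return 0
-- ===== Notes on version B (the rewrite author's own statement) =====
-- stated objective: simpler
-- what changed: Replaces the stateful skip-index walk (counter j that conditionally jumps over pos_removed) by first filtering out the removed position with an enumerate comprehension and then a plain index-for-index comparison loop; B raises IndexError exactly where A does.
import Mathlib
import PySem

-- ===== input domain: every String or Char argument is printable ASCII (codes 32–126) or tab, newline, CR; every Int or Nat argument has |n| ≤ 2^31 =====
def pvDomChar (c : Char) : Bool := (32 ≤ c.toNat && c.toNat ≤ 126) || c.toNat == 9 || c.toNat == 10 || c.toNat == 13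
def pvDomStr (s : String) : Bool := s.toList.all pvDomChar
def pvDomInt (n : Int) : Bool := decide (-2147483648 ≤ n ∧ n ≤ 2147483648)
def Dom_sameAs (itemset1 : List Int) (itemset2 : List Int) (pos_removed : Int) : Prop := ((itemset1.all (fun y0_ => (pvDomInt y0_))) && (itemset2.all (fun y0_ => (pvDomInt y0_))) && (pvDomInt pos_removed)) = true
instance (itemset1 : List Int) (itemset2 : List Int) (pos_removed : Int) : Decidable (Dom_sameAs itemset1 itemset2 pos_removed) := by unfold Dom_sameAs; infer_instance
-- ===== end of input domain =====

-- B replaces A's stateful skip-index walk by "filter out the removed position, then compare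
-- index for index" — simpler, no skip bookkeeping (objective: simpler; same O(n) cost).
-- Both Pythons raise IndexError on the same inputs; those are outside Pre_sameAs.

-- ===== PORT A =====
-- loop 'for i in range(len(itemset1))' with early return, transliterated as structural
-- recursion over itemset1 (the elements itemset1[i] in order) carrying Python's j.
-- On the inputs where Python raises IndexError (pyGet? = none) the port returns 0;
-- exactly those inputs are excluded by Pre_sameAs.
def sameAsGo (itemset2 : List Int) (pos_removed : Int) : List Int → Int → Int
  | [], _ => 0
  | x :: rest, j =>
    let j' := if j = pos_removed then j + 1 else j
    match PySem.List.pyGet? itemset2 j' with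
    | none => 0  -- Python: IndexError (outside Pre_sameAs)
    | some y =>
      if x = y then sameAsGo itemset2 pos_removed rest (j' + 1)
      else if x > y then 1
      else -1

def sameAs (itemset1 : List Int) (itemset2 : List Int) (pos_removed : Int) : Int :=
  sameAsGo itemset2 pos_removed itemset1 0

-- ===== PORT B =====
-- '[x for idx, x in enumerate(itemset2) if idx != pos_removed]' as a recursion with an index counter
def filterIdx (pos_removed : Int) : List Int → Int → List Int
  | [], _ => []
  | x :: rest, idx =>
    if idx ≠ pos_removed then x :: filterIdx pos_removed rest (idx + 1)
    else filterIdx pos_removed rest (idx + 1)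

-- 'for i in range(len(itemset1)): …' comparing itemset1[i] with filtered[i];
-- pyGet? = none is Python's IndexError (outside Pre_sameAs), the port returns 0 there
def sameAsCmp (filtered : List Int) : List Int → Int → Int
  | [], _ => 0
  | x :: rest, i =>
    match PySem.List.pyGet? filtered i with
    | none => 0  -- Python: IndexError (outside Pre_sameAs)
    | some y =>
      if x > y then 1
      else if x < y then -1
      else sameAsCmp filtered rest (i + 1)

def sameAs_alt (itemset1 : List Int) (itemset2 : List Int) (pos_removed : Int) : Int :=
  sameAsCmp (filterIdx pos_removed itemset2 0) itemset1 0

-- ===== PRECONDITION & SPEC =====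
-- Pre_ excludes exactly the inputs where both Pythons raise IndexError: itemset1 is longer
-- than itemset2 with position pos_removed dropped, and agrees with it on that whole prefix.
def Pre_sameAs (itemset1 : List Int) (itemset2 : List Int) (pos_removed : Int) : Prop :=
  ¬ (let f := if 0 ≤ pos_removed then itemset2.eraseIdx pos_removed.toNat else itemset2
     f.length < itemset1.length ∧ itemset1.take f.length = f)
instance (itemset1 : List Int) (itemset2 : List Int) (pos_removed : Int) : Decidable (Pre_sameAs itemset1 itemset2 pos_removed) := by unfold Pre_sameAs; infer_instance

def pvWitness_sameAs : List Int × List Int × Int := ([1], [1, 2], 0)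

def Spec_sameAs (itemset1 : List Int) (itemset2 : List Int) (pos_removed : Int) (out : Int) : Prop := out = sameAs_alt itemset1 itemset2 pos_removed
instance (itemset1 : List Int) (itemset2 : List Int) (pos_removed : Int) (out : Int) : Decidable (Spec_sameAs itemset1 itemset2 pos_removed out) := by unfold Spec_sameAs; infer_instance

-- ===== CLAIM (what is proved, stated in full; the proofs are below) =====
def Claim_equal_sameAs : Prop := ∀ (itemset1 : List Int) (itemset2 : List Int) (pos_removed : Int), Dom_sameAs itemset1 itemset2 pos_removed → Pre_sameAs itemset1 itemset2 pos_removed → Spec_sameAs itemset1 itemset2 pos_removed (sameAs itemset1 itemset2 pos_removed)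

-- ===== LEMMAS AND PROOFS =====

-- proof-only normal form: element-wise comparison of zipped pairs
def cmpZip : List (Int × Int) → Int
  | [] => 0
  | (a, b) :: rest => if a ≠ b then (if a > b then 1 else -1) else cmpZip rest

-- the filtered suffix seen from absolute index j is empty when the drop is empty
theorem filterIdx_drop_ge {l2 : List Int} {pos : Int} {n : Nat} (h : l2.length ≤ n) (idx : Int) :
    filterIdx pos (l2.drop n) idx = [] := by
  rw [List.drop_eq_nil_of_le h]; rfl

-- when the current index equals pos, the filtered view from j equals the one from j+1
theorem filterIdx_drop_succ (l2 : List Int) (pos : Int) (n : Nat) (h : n < l2.length) :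
    filterIdx pos (l2.drop n) n =
      (if (n : Int) ≠ pos then [l2[n]] else []) ++ filterIdx pos (l2.drop (n + 1)) (n + 1) := by
  rw [List.drop_eq_getElem_cons h]
  by_cases hp : (n : Int) = pos <;> simp [filterIdx, hp]

theorem sameAsGo_cons (l2 : List Int) (pos x : Int) (rest : List Int) (j : Int) :
    sameAsGo l2 pos (x :: rest) j =
      (match PySem.List.pyGet? l2 (if j = pos then j + 1 else j) with
       | none => 0
       | some y =>
         if x = y then sameAsGo l2 pos rest ((if j = pos then j + 1 else j) + 1)
         else if x > y then 1 else -1) := rfl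

-- one non-skip comparison step of A (the current index j is not the removed position)
theorem step_eq (l2 : List Int) (pos x : Int) (rest : List Int) (n : Nat)
    (hp : (n : Int) ≠ pos)
    (ih : ∀ m : Nat, sameAsGo l2 pos rest (m : Int) = cmpZip (rest.zip (filterIdx pos (l2.drop m) (m : Int)))) :
    (match PySem.List.pyGet? l2 (n : Int) with
     | none => (0 : Int)
     | some y => if x = y then sameAsGo l2 pos rest ((n : Int) + 1) else if x > y then 1 else -1) =
      cmpZip ((x :: rest).zip (filterIdx pos (l2.drop n) (n : Int))) := by
  rcases Nat.lt_or_ge n l2.length with h | h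
  · have hget : PySem.List.pyGet? l2 (n : Int) = some l2[n] := by
      rw [PySem.List.pyGet?_natCast, List.getElem?_eq_getElem h]
    have hstep : filterIdx pos (l2.drop n) (n : Int) =
        l2[n] :: filterIdx pos (l2.drop (n + 1)) ((n : Int) + 1) := by
      rw [filterIdx_drop_succ l2 pos n h, if_pos hp]
      simp
    have ihn := ih (n + 1)
    push_cast at ihn
    rw [hget, hstep]
    show (if x = l2[n] then sameAsGo l2 pos rest ((n : Int) + 1) else if x > l2[n] then 1 else -1) =
      cmpZip ((x, l2[n]) :: rest.zip (filterIdx pos (l2.drop (n + 1)) ((n : Int) + 1)))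
    rw [ihn]
    by_cases he : x = l2[n]
    · simp [cmpZip, he]
    · by_cases hgt : x > l2[n] <;> simp [cmpZip, he, hgt]
  · have hget : PySem.List.pyGet? l2 (n : Int) = none := by
      rw [PySem.List.pyGet?_natCast, List.getElem?_eq_none_iff.mpr h]
    rw [hget, filterIdx_drop_ge h]
    simp [cmpZip]

-- A-side invariant: A's loop from state j = n equals the zip-compare against the filtered suffix
theorem go_eq (l2 : List Int) (pos : Int) :
    ∀ (l1 : List Int) (n : Nat),
      sameAsGo l2 pos l1 (n : Int) = cmpZip (l1.zip (filterIdx pos (l2.drop n) (n : Int))) := by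
  intro l1
  induction l1 with
  | nil => intro n; simp [sameAsGo, cmpZip]
  | cons x rest ih =>
    intro n
    rw [sameAsGo_cons]
    by_cases hp : (n : Int) = pos
    · have hview : filterIdx pos (l2.drop n) (n : Int) = filterIdx pos (l2.drop (n + 1)) ((n : Int) + 1) := by
        rcases Nat.lt_or_ge n l2.length with h | h
        · rw [filterIdx_drop_succ l2 pos n h, if_neg (by simp [hp]), List.nil_append]
        · rw [filterIdx_drop_ge h, filterIdx_drop_ge (by omega)]
      rw [if_pos hp, hview,
        show ((n : Int) + 1) = ((n + 1 : Nat) : Int) by push_cast; ring]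
      exact step_eq l2 pos x rest (n + 1) (by push_cast; omega) ih
    · rw [if_neg hp]
      exact step_eq l2 pos x rest n hp ih

-- B-side invariant: B's indexed loop from index n equals the zip-compare against filtered.drop n
theorem cmp_eq (f : List Int) :
    ∀ (l1 : List Int) (n : Nat),
      sameAsCmp f l1 (n : Int) = cmpZip (l1.zip (f.drop n)) := by
  intro l1
  induction l1 with
  | nil => intro n; simp [sameAsCmp, cmpZip]
  | cons x rest ih =>
    intro n
    rcases Nat.lt_or_ge n f.length with h | h
    · have hget : PySem.List.pyGet? f (n : Int) = some f[n] := by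
        rw [PySem.List.pyGet?_natCast, List.getElem?_eq_getElem h]
      have ihn := ih (n + 1)
      push_cast at ihn
      rw [List.drop_eq_getElem_cons h]
      show (match PySem.List.pyGet? f (n : Int) with
            | none => (0 : Int)
            | some y => if x > y then 1 else if x < y then -1 else sameAsCmp f rest ((n : Int) + 1)) =
        cmpZip ((x, f[n]) :: rest.zip (f.drop (n + 1)))
      rw [hget]
      show (if x > f[n] then (1 : Int) else if x < f[n] then -1 else sameAsCmp f rest ((n : Int) + 1)) =
        cmpZip ((x, f[n]) :: rest.zip (f.drop (n + 1)))
      rw [ihn]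
      by_cases hgt : x > f[n]
      · simp [cmpZip, hgt, ne_of_gt hgt]
      · by_cases hlt : x < f[n]
        · simp [cmpZip, hgt, hlt, ne_of_lt hlt]
        · have he : x = f[n] := by omega
          simp [cmpZip, he]
    · have hget : PySem.List.pyGet? f (n : Int) = none := by
        rw [PySem.List.pyGet?_natCast, List.getElem?_eq_none_iff.mpr h]
      rw [List.drop_eq_nil_of_le h]
      show (match PySem.List.pyGet? f (n : Int) with
            | none => (0 : Int)
            | some y => if x > y then 1 else if x < y then -1 else sameAsCmp f rest ((n : Int) + 1)) =
        cmpZip ((x :: rest).zip [])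
      rw [hget]
      simp [cmpZip]

-- ===== VERDICT (by name: the statement is the Claim_ definition above) =====
theorem sameAs_spec : Claim_equal_sameAs := by
  intro l1 l2 pos _ _
  unfold Spec_sameAs sameAs sameAs_alt
  have hA := go_eq l2 pos l1 0
  have hB := cmp_eq (filterIdx pos l2 0) l1 0
  simp only [Int.natCast_zero] at hA hB
  rw [hA, hB]
  simp
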